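-- pv_equiv track=rewrite | github.com/lamek-tsegay/logiccraft | src/logiccraft/equiv.py | _all_assignments
-- ===== SOURCE A (Python) =====
-- from typing import Dict, List, Optional, Sequence, Tuple
--
-- def _all_assignments(var_order: Sequence[str]):
--     # yields env dicts in lexicographic bit order
--     n = len(var_order)
--     for mask in range(2**n):
--         env: Dict[str, int] = {}
--         for i, v in enumerate(var_order):
--             bit = (mask >> (n - 1 - i)) & 1
--             env[v] = bit
--         yield env
-- ===== SOURCE B (Python) =====
-- def _all_assignments(var_order):
--     # Recursive backtracking enumeration: branch 0 then 1 on the head variable,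
--     # carrying a partial env; yields fresh dicts in lexicographic bit order.
--     def rec(vs, env):
--         if not vs:
--             yield env
--             return
--         v, rest = vs[0], vs[1:]
--         for bit in (0, 1):
--             e = dict(env)
--             e[v] = bit
--             yield from rec(rest, e)
--     yield from rec(list(var_order), {})
-- ===== Notes on version B (the rewrite author's own statement) =====
-- stated objective: alternative
-- what changed: Replaces the 2**n mask loop with per-bit extraction by a recursive backtracking enumeration over the variable list, branching on 0 then 1 for the head variable and yielding fresh dicts at the leaves in the same lexicographic order.
import Mathlib
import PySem

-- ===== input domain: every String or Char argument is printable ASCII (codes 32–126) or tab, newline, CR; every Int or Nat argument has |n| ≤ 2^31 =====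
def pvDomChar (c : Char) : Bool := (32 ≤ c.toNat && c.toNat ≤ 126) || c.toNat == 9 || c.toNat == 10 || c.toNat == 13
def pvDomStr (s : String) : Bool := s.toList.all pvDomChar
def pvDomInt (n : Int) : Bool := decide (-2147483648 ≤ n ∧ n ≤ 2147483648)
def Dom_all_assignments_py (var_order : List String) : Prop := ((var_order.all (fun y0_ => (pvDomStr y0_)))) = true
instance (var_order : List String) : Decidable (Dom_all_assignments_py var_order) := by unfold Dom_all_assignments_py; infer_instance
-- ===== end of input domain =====

-- B replaces A's mask loop with a recursive backtracking enumeration over the variables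
-- (branch 0 then 1 on the head variable); same 2^n assignments in the same order.

-- ===== PORT A =====
-- for mask in range(2**n): env = {}; for i, v in enumerate(var_order): env[v] = (mask >> (n-1-i)) & 1; yield env
def all_assignments_py (var_order : List String) : List (List (String × Int)) :=
  -- n = len(var_order), written out inline
  (PySem.List.pyRange 0 ((2 : Int) ^ var_order.length) 1).map (fun (mask : Int) =>
    ((PySem.List.enumerate var_order 0).foldl
      (fun (env : PySem.Dict String Int) iv =>
        -- i ranges over 0..n-1 so n-1-i is the exact Python value (Nat subtraction safe)
        env.insert iv.2 (PySem.Int.band (mask >>> (var_order.length - 1 - iv.1.toNat)) 1))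
      PySem.Dict.empty).items)

-- ===== PORT B =====
-- def rec(vars, env): if not vars: yield env; else for bit in (0,1): e = dict(env); e[v]=bit; yield from rec(rest, e)
def pvRecB (vars : List String) (env : PySem.Dict String Int) : List (List (String × Int)) :=
  match vars with
  | [] => [env.items]
  | v :: rest => [(0 : Int), 1].flatMap (fun bit => pvRecB rest (env.insert v bit))

def all_assignments_py_alt (var_order : List String) : List (List (String × Int)) :=
  pvRecB var_order PySem.Dict.empty

-- ===== PRECONDITION & SPEC =====
def Spec_all_assignments_py (var_order : List String) (out : List (List (String × Int))) : Prop := out = all_assignments_py_alt var_order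
instance (var_order : List String) (out : List (List (String × Int))) : Decidable (Spec_all_assignments_py var_order out) := by unfold Spec_all_assignments_py; infer_instance

-- ===== CLAIM (what is proved, stated in full; the proofs are below) =====
def Claim_equal_all_assignments_py : Prop := ∀ (var_order : List String), Dom_all_assignments_py var_order → Spec_all_assignments_py var_order (all_assignments_py var_order)

-- ===== LEMMAS AND PROOFS =====

-- A's inner env-building fold, restated structurally on a Nat mask:
-- the element at distance rest.length from the end reads bit rest.length of the mask.
def pvFoldB : List String → Nat → PySem.Dict String Int → PySem.Dict String Int
  | [], _, env => env
  | v :: rest, m, env =>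
      pvFoldB rest m (env.insert v (if m.testBit rest.length then 1 else 0))

lemma pv_band_one (m k : Nat) :
    PySem.Int.band (((m : Nat) : Int) >>> k) 1 = (if m.testBit k then (1 : Int) else 0) := by
  have h1 : ((m : Nat) : Int) >>> k = ((m >>> k : Nat) : Int) := rfl
  rw [h1]
  have h2 : PySem.Int.band ((m >>> k : Nat) : Int) 1 = ((m >>> k &&& 1 : Nat) : Int) := by
    exact_mod_cast PySem.Int.band_natCast (m >>> k) 1
  rw [h2, Nat.and_one_is_mod, Nat.testBit]
  rcases Nat.mod_two_eq_zero_or_one (m >>> k) with h | h <;> simp [h]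

lemma pv_foldA_eq_foldB (n : Nat) :
    ∀ (vars : List String) (s : Nat), s + vars.length = n →
    ∀ (env : PySem.Dict String Int) (m : Nat),
      (PySem.List.enumerate vars ((s : Nat) : Int)).foldl
        (fun env iv => env.insert iv.2
          (PySem.Int.band (((m : Nat) : Int) >>> (n - 1 - iv.1.toNat)) 1)) env
      = pvFoldB vars m env := by
  intro vars
  induction vars with
  | nil => intro s _ env m; simp [PySem.List.enumerate_nil, pvFoldB]
  | cons v rest ih =>
      intro s hs env m
      rw [PySem.List.enumerate_cons]
      simp only [List.foldl_cons]
      have hsh : n - 1 - ((s : Int)).toNat = rest.length := by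
        simp only [List.length_cons] at hs
        simp only [Int.toNat_natCast]; omega
      rw [hsh, pv_band_one]
      have hcast : ((s : Int) + 1) = (((s + 1 : Nat)) : Int) := by push_cast; ring
      rw [hcast, ih (s + 1) (by simp only [List.length_cons] at hs; omega)]
      rfl

lemma pv_foldB_mod : ∀ (vars : List String) (m : Nat) (env : PySem.Dict String Int),
    pvFoldB vars (m % 2 ^ vars.length) env = pvFoldB vars m env := by
  intro vars
  induction vars with
  | nil => intro m env; rfl
  | cons v rest ih =>
      intro m env
      simp only [pvFoldB, List.length_cons]
      have hb := Nat.testBit_mod_two_pow m (rest.length + 1) rest.length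
      simp only [hb]
      have hlt : rest.length < rest.length + 1 := Nat.lt_succ_self _
      simp only [hlt, decide_true, Bool.true_and]
      have h1 := ih (m % 2 ^ (rest.length + 1)) (env.insert v (if m.testBit rest.length then 1 else 0))
      have h2 := ih m (env.insert v (if m.testBit rest.length then 1 else 0))
      rw [← h1, ← h2, Nat.mod_mod_of_dvd _ (pow_dvd_pow 2 (Nat.le_succ _))]

lemma pv_testBit_top (m L : Nat) (h : m < 2 ^ L) : (2 ^ L + m).testBit L = true := by
  rw [Nat.testBit, Nat.shiftRight_eq_div_pow, Nat.add_comm,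
    Nat.add_div_right _ (Nat.two_pow_pos L), Nat.div_eq_of_lt h]
  decide

lemma pv_main : ∀ (vars : List String) (env : PySem.Dict String Int),
    (List.range (2 ^ vars.length)).map (fun m => (pvFoldB vars m env).items)
      = pvRecB vars env := by
  intro vars
  induction vars with
  | nil => intro env; simp [pvRecB, pvFoldB]
  | cons v rest ih =>
      intro env
      have hsplit : (2 : Nat) ^ (v :: rest).length = 2 ^ rest.length + 2 ^ rest.length := by
        simp [List.length_cons, pow_succ]; ring
      rw [hsplit, List.range_add, List.map_append, List.map_map]
      have hlow : (List.range (2 ^ rest.length)).map (fun m => (pvFoldB (v :: rest) m env).items)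
          = pvRecB rest (env.insert v 0) := by
        rw [← ih (env.insert v 0)]
        apply List.map_congr_left
        intro m hm
        rw [List.mem_range] at hm
        simp [pvFoldB, Nat.testBit_lt_two_pow hm]
      have hhigh : (List.range (2 ^ rest.length)).map
            ((fun m => (pvFoldB (v :: rest) m env).items) ∘ (fun x => 2 ^ rest.length + x))
          = pvRecB rest (env.insert v 1) := by
        rw [← ih (env.insert v 1)]
        apply List.map_congr_left
        intro m hm
        rw [List.mem_range] at hm
        simp only [Function.comp_apply, pvFoldB, pv_testBit_top m rest.length hm, if_pos]
        congr 1
        have heq : (2 ^ rest.length + m) % 2 ^ rest.length = m := by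
          rw [Nat.add_comm, Nat.add_mod_right]; exact Nat.mod_eq_of_lt hm
        rw [← pv_foldB_mod rest (2 ^ rest.length + m), heq]
      rw [hlow, hhigh]
      simp [pvRecB]

-- ===== VERDICT (by name: the statement is the Claim_ definition above) =====
theorem all_assignments_py_spec : Claim_equal_all_assignments_py := by
  intro var_order _
  unfold Spec_all_assignments_py all_assignments_py all_assignments_py_alt
  rw [PySem.List.pyRange_one]
  have hn : (((2 : Int) ^ var_order.length) - 0).toNat = 2 ^ var_order.length := by
    rw [sub_zero]; norm_cast
  rw [hn, List.map_map, ← pv_main var_order PySem.Dict.empty]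
  apply List.map_congr_left
  intro m _
  simp only [Function.comp_apply, zero_add]
  exact congrArg PySem.Dict.items
    (pv_foldA_eq_foldB var_order.length var_order 0 (by simp) PySem.Dict.empty m)
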